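-- pv_equiv track=rewrite | github.com/pypi-data/pypi-mirror-349 | packages/eodatasets3/eodatasets3-1.9.3.tar.gz/eodatasets3-1.9.3/eodatasets3/images.py | generate_tiles
-- ===== SOURCE A (Python) =====
-- from collections.abc import Generator, Iterable, Sequence
--
-- def generate_tiles(
--     samples: int, lines: int, xtile: int | None = None, ytile: int | None = None
-- ) -> Generator[tuple[tuple[int, int], tuple[int, int]], None, None]:
--     """
--     Generates a list of tile indices for a 2D array.
--
--     :param samples:
--         An integer expressing the total number of samples in an array.
--
--     :param lines:
--         An integer expressing the total number of lines in an array.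
--
--     :param xtile:
--         (Optional) The desired size of the tile in the x-direction.
--         Default is all samples
--
--     :param ytile:
--         (Optional) The desired size of the tile in the y-direction.
--         Default is min(100, lines) lines.
--
--     :return:
--         Each tuple in the generator contains
--         ((ystart,yend),(xstart,xend)).
--
--     >>> import pprint
--     >>> tiles = generate_tiles(1624, 1567, xtile=1000, ytile=400)
--     >>> pprint.pprint(list(tiles))
--     [((0, 400), (0, 1000)),
--      ((0, 400), (1000, 1624)),
--      ((400, 800), (0, 1000)),
--      ((400, 800), (1000, 1624)),
--      ((800, 1200), (0, 1000)),
--      ((800, 1200), (1000, 1624)),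
--      ((1200, 1567), (0, 1000)),
--      ((1200, 1567), (1000, 1624))]
--     """
--
--     def create_tiles(samples, lines, xstart, ystart):
--         """
--         Creates a generator object for the tiles.
--         """
--         for ystep in ystart:
--             if ystep + ytile < lines:
--                 yend = ystep + ytile
--             else:
--                 yend = lines
--             for xstep in xstart:
--                 if xstep + xtile < samples:
--                     xend = xstep + xtile
--                 else:
--                     xend = samples
--                 yield ((ystep, yend), (xstep, xend))
--
--     # check for default or out of bounds
--     if xtile is None or xtile < 0:
--         xtile = samples
--     if ytile is None or ytile < 0:
--         ytile = min(100, lines)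
--
--     xstart = range(0, samples, xtile)
--     ystart = range(0, lines, ytile)
--
--     tiles = create_tiles(samples, lines, xstart, ystart)
--
--     return tiles
-- ===== SOURCE B (Python) =====
-- def generate_tiles(samples, lines, xtile=None, ytile=None):
--     """Flattened formulation: instead of A's nested y/x loops over range
--     objects, compute the tile-grid dimensions (ny, nx) once and drive a
--     single loop over the flat tile index k, recovering the row/column pair
--     with divmod and the tile corners by multiplication.  The ranges are
--     taken eagerly so a zero step still raises ValueError at call time,
--     exactly as in A."""
--     if xtile is None or xtile < 0:
--         xtile = samples
--     if ytile is None or ytile < 0: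
--         ytile = min(100, lines)
--     ny = len(range(0, lines, ytile))    # ValueError here if ytile == 0
--     nx = len(range(0, samples, xtile))  # ValueError here if xtile == 0
--
--     def tiles():
--         for k in range(ny * nx):
--             i, j = divmod(k, nx)
--             ys = i * ytile
--             xs = j * xtile
--             yield ((ys, min(ys + ytile, lines)), (xs, min(xs + xtile, samples)))
--
--     return tiles()
-- ===== Notes on version B (the rewrite author's own statement) =====
-- stated objective: alternative
-- what changed: Replaced A's nested for-ystep/for-xstep generator over two range objects by a single flat loop over the tile index k in range(ny*nx), recovering the row/column pair with divmod and computing clamped corners by multiplication from the precomputed grid dimensions.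
import Mathlib
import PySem

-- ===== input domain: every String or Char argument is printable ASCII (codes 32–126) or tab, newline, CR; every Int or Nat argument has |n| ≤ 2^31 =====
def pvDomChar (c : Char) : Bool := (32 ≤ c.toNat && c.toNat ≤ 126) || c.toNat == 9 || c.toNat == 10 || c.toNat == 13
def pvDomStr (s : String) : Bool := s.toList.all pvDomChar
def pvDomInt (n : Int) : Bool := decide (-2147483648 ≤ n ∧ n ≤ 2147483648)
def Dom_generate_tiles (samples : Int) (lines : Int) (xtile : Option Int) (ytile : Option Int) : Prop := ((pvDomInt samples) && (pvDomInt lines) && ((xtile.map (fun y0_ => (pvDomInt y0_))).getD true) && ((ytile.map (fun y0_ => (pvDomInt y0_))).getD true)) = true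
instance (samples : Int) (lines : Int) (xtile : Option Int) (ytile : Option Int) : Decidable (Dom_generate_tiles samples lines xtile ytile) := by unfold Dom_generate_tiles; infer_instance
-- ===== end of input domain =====

-- B replaces A's nested y/x loops over range values by one flat loop over the tile index k,
-- recovering row/column with divmod and the corners by multiplication (objective: alternative).
-- Both Pythons return a generator; equivalence is about the yielded sequence (no argument is mutated).

-- ===== PORT A =====
-- effective tile sizes after the shared default/out-of-bounds check at the top of both Pythons
def pvEffX (samples : Int) (xtile : Option Int) : Int :=
  match xtile with
  | none => samples
  | some x => if x < 0 then samples else x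

def pvEffY (lines : Int) (ytile : Option Int) : Int :=
  match ytile with
  | none => min 100 lines
  | some y => if y < 0 then min 100 lines else y

def generate_tiles (samples : Int) (lines : Int) (xtile : Option Int) (ytile : Option Int) : List ((Int × Int) × (Int × Int)) :=
  let xt := pvEffX samples xtile
  let yt := pvEffY lines ytile
  let xstart := PySem.List.pyRange 0 samples xt
  let ystart := PySem.List.pyRange 0 lines yt
  -- create_tiles: for ystep in ystart: … for xstep in xstart: … yield
  ystart.foldl (fun acc ystep =>
    let yend := if ystep + yt < lines then ystep + yt else lines
    xstart.foldl (fun acc2 xstep =>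
      let xend := if xstep + xt < samples then xstep + xt else samples
      acc2 ++ [((ystep, yend), (xstep, xend))]) acc) []

-- ===== PORT B =====
def generate_tiles_alt (samples : Int) (lines : Int) (xtile : Option Int) (ytile : Option Int) : List ((Int × Int) × (Int × Int)) :=
  let xt := pvEffX samples xtile
  let yt := pvEffY lines ytile
  let ny : Int := (PySem.List.pyRange 0 lines yt).length
  let nx : Int := (PySem.List.pyRange 0 samples xt).length
  -- for k in range(ny * nx): i, j = divmod(k, nx); …
  (PySem.List.pyRange 0 (ny * nx) 1).map (fun k =>
    let i := PySem.Int.floordiv k nx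
    let j := PySem.Int.mod k nx
    let ys := i * yt
    let xs := j * xt
    ((ys, min (ys + yt) lines), (xs, min (xs + xt) samples)))

-- ===== PRECONDITION & SPEC =====
-- Pre_ excludes exactly the inputs where the effective x- or y-tile size is 0:
-- there Python's range(0, _, 0) raises ValueError (eagerly, in both A and B).
def Pre_generate_tiles (samples : Int) (lines : Int) (xtile : Option Int) (ytile : Option Int) : Prop :=
  pvEffX samples xtile ≠ 0 ∧ pvEffY lines ytile ≠ 0
instance (samples : Int) (lines : Int) (xtile : Option Int) (ytile : Option Int) : Decidable (Pre_generate_tiles samples lines xtile ytile) := by unfold Pre_generate_tiles; infer_instance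

def pvWitness_generate_tiles : Int × Int × Option Int × Option Int := (1624, 1567, some 1000, some 400)

def Spec_generate_tiles (samples : Int) (lines : Int) (xtile : Option Int) (ytile : Option Int) (out : List ((Int × Int) × (Int × Int))) : Prop := out = generate_tiles_alt samples lines xtile ytile
instance (samples : Int) (lines : Int) (xtile : Option Int) (ytile : Option Int) (out : List ((Int × Int) × (Int × Int))) : Decidable (Spec_generate_tiles samples lines xtile ytile out) := by unfold Spec_generate_tiles; infer_instance

-- ===== CLAIM (what is proved, stated in full; the proofs are below) =====
def Claim_equal_generate_tiles : Prop := ∀ (samples : Int) (lines : Int) (xtile : Option Int) (ytile : Option Int), Dom_generate_tiles samples lines xtile ytile → Pre_generate_tiles samples lines xtile ytile → Spec_generate_tiles samples lines xtile ytile (generate_tiles samples lines xtile ytile)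

-- ===== LEMMAS AND PROOFS =====

-- A's two-level accumulator fold equals init ++ the flatMap-of-maps form.
theorem pv_fold_flat {α β γ : Type} (ys : List α) (xs : List β)
    (h : α → β → γ) (init : List γ) :
    ys.foldl (fun acc y => xs.foldl (fun acc2 x => acc2 ++ [h y x]) acc) init
      = init ++ ys.flatMap (fun y => xs.map (fun x => h y x)) := by
  induction ys generalizing init with
  | nil => simp
  | cons y ys ih =>
    rw [List.foldl_cons, ih, PySem.List.foldl_append_singleton_eq_map]
    simp [List.append_assoc]

-- range(0, b, s) with s ≠ 0 lists i*s for i below its length.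
theorem pv_range_idx (b s : Int) (hs : s ≠ 0) :
    PySem.List.pyRange 0 b s
      = (List.range (PySem.List.pyRange 0 b s).length).map (fun (k : Nat) => (k : Int) * s) := by
  rcases lt_or_gt_of_ne hs with h | h
  · rw [PySem.List.pyRange_of_neg 0 b h]
    simp only [List.length_map, List.length_range]
    exact List.map_congr_left (fun k _ => by ring)
  · rw [PySem.List.pyRange_of_pos 0 b h]
    simp only [List.length_map, List.length_range]
    exact List.map_congr_left (fun k _ => by ring)

-- the row-major nested enumeration is the flat divmod enumeration.
theorem pv_flat_divmod {γ : Type} (g : Nat → Nat → γ) (ny nx : Nat) :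
    (List.range ny).flatMap (fun i => (List.range nx).map (fun j => g i j))
      = (List.range (ny * nx)).map (fun k => g (k / nx) (k % nx)) := by
  rcases Nat.eq_zero_or_pos nx with h0 | hpos
  · subst h0; simp
  · induction ny with
    | zero => simp
    | succ n ih =>
      rw [List.range_succ, List.flatMap_append, ih, Nat.succ_mul, List.range_add,
        List.map_append]
      congr 1
      simp only [List.flatMap_cons, List.flatMap_nil, List.append_nil, List.map_map]
      apply List.map_congr_left
      intro j hj
      rw [List.mem_range] at hj
      simp only [Function.comp]
      congr 1
      · rw [Nat.mul_comm n nx, Nat.mul_add_div hpos, Nat.div_eq_of_lt hj, Nat.add_zero]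
      · rw [Nat.mul_comm n nx, Nat.mul_add_mod, Nat.mod_eq_of_lt hj]

-- the whole body of both ports, once ranges are in index form.
theorem pv_main {γ : Type} (h : Int → Int → γ) (yt xt : Int) (NY NX : Nat) :
    ((List.range NY).map (fun (k : Nat) => (k : Int) * yt)).flatMap
      (fun ys => ((List.range NX).map (fun (k : Nat) => (k : Int) * xt)).map (fun xs => h ys xs))
    = ((List.range (NY * NX)).map (fun (k : Nat) => (k : Int))).map
        (fun k => h (PySem.Int.floordiv k NX * yt) (PySem.Int.mod k NX * xt)) := by
  rw [List.flatMap_map, List.map_map]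
  simp only [List.map_map, Function.comp_def]
  rw [pv_flat_divmod (fun i j => h ((i : Int) * yt) ((j : Int) * xt)) NY NX]
  exact List.map_congr_left (fun k _ => by
    simp [PySem.Int.floordiv_natCast, PySem.Int.mod_natCast])

-- ===== VERDICT (by name: the statement is the Claim_ definition above) =====
theorem generate_tiles_spec : Claim_equal_generate_tiles := by
  intro samples lines xtile ytile _ hpre
  obtain ⟨hx0, hy0⟩ := hpre
  unfold Spec_generate_tiles generate_tiles generate_tiles_alt
  set xt := pvEffX samples xtile with hxt
  set yt := pvEffY lines ytile with hyt
  have hy : ∀ y : Int, (if y + yt < lines then y + yt else lines) = min (y + yt) lines :=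
    fun y => by rw [Int.min_def]; split_ifs <;> omega
  have hx : ∀ x : Int, (if x + xt < samples then x + xt else samples) = min (x + xt) samples :=
    fun x => by rw [Int.min_def]; split_ifs <;> omega
  simp only [pv_fold_flat, List.nil_append, hy, hx]
  rw [pv_range_idx lines yt hy0, pv_range_idx samples xt hx0]
  simp only [List.length_map, List.length_range]
  rw [show (((PySem.List.pyRange 0 lines yt).length : Int) *
        ((PySem.List.pyRange 0 samples xt).length : Int))
      = (((PySem.List.pyRange 0 lines yt).length * (PySem.List.pyRange 0 samples xt).length : Nat) : Int)
    from by push_cast; ring]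
  rw [PySem.List.pyRange_zero_natCast]
  exact pv_main (fun ys xs => ((ys, min (ys + yt) lines), (xs, min (xs + xt) samples))) yt xt _ _
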